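-- pv_equiv track=rewrite | github.com/gudals113/Algorithms | kakao/kakao-blind-2022/kakao-blind-2022-1.py | solution
-- ===== SOURCE A (Python) =====
-- from collections import defaultdict
--
-- def solution(id_list, report, k):
--     answer = []
--     whoReportMe ={}
--     answerDict = {}
--     for user in id_list:
--         whoReportMe[user] = defaultdict(int)
--         answerDict[user] = 0
--
--     for r in report:
--         reporting,reported = r.split()
--         whoReportMe[reported][reporting]+=1
--
--     for user in id_list:
--         if len(whoReportMe[user]) >=k:
--             for reporting,_ in whoReportMe[user].items():
--                 answerDict[reporting]+=1
--
--
--     for i in range(len(id_list)):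
--         answer.append(answerDict[id_list[i]])
--
--     return answer
-- ===== SOURCE B (Python) =====
-- def solution(id_list, report, k):
--     pairs = {tuple(r.split()) for r in report}
--     counts = {}
--     for _, reported in pairs:
--         counts[reported] = counts.get(reported, 0) + 1
--     answer = {u: 0 for u in id_list}
--     for reporter, reported in pairs:
--         if counts.get(reported, 0) >= k:
--             answer[reporter] += 1
--     return [answer[u] for u in id_list]
-- ===== Notes on version B (the rewrite author's own statement) =====
-- stated objective: idiomatic
-- what changed: A builds a per-user nested dict of reporter counts and a second nested pass over id_list incrementing notification counts; B dedupes the reports once into a set of (reporter, reported) pairs, builds a flat Counter-style dict of distinct reporters per reported user, and makes a single flat pass over the deduped set incrementing answer[reporter] when the threshold is met.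
-- outside the precondition, e.g. on solution(['a', 'b', 'a'], ['b a'], 1): A returns [0, 2, 0], B returns [0, 1, 0]; on solution(['a'], ['a b'], 1): A raises KeyError, B returns [1]
import Mathlib
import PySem

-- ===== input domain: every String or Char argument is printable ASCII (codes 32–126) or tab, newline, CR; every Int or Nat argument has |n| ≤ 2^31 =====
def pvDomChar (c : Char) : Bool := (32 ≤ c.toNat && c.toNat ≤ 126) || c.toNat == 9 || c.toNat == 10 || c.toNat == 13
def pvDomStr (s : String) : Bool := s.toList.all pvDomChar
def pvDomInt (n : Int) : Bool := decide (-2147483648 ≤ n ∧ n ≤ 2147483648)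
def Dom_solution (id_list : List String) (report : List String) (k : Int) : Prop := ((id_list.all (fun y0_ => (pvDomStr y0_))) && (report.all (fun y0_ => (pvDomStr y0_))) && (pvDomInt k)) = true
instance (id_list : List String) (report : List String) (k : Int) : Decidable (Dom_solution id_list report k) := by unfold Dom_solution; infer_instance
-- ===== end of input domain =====

-- B replaces A's per-user nested dict of reporter counts and nested suspension pass by a
-- deduped set of (reporter, reported) pairs, a flat count of distinct reporters, and one
-- flat pass incrementing answer[reporter] — more idiomatic, same cost.


-- ===== PORT A =====
-- the body of A's "for r in report" loop: reporting, reported = r.split(); whoReportMe[reported][reporting] += 1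
def solutionReportStep (d : PySem.Dict String (PySem.Dict String Int)) (r : String) :
    PySem.Dict String (PySem.Dict String Int) :=
  match PySem.Str.split₀ r with
  | [reporting, reported] =>
      let inner := d.getD reported PySem.Dict.empty
      d.insert reported (inner.insert reporting (inner.getD reporting 0 + 1))
  | _ => d  -- Python raises ValueError/KeyError here; excluded by Pre_solution

def solution (id_list : List String) (report : List String) (k : Int) : List Int :=
  -- for user in id_list: whoReportMe[user] = defaultdict(int); answerDict[user] = 0
  let init := id_list.foldl
      (fun (st : PySem.Dict String (PySem.Dict String Int) × PySem.Dict String Int) user =>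
        (st.1.insert user PySem.Dict.empty, st.2.insert user 0))
      (PySem.Dict.empty, PySem.Dict.empty)
  let whoReportMe := init.1
  let answerDict := init.2
  -- for r in report: …
  let whoReportMe := report.foldl solutionReportStep whoReportMe
  -- for user in id_list: if len(whoReportMe[user]) >= k: for reporting, _ in items: answerDict[reporting] += 1
  let answerDict := id_list.foldl
      (fun ad user =>
        let inner := whoReportMe.getD user PySem.Dict.empty
        if ((inner.size : Int)) ≥ k then
          inner.items.foldl (fun ad p => ad.insert p.1 (ad.getD p.1 0 + 1)) ad
        else ad)
      answerDict
  -- for i in range(len(id_list)): answer.append(answerDict[id_list[i]])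
  (PySem.List.pyRange 0 (id_list.length : Int) 1).foldl
      (fun answer i => answer ++ [answerDict.getD (PySem.List.pyGetD id_list i "") 0]) []

-- ===== PORT B =====
-- counts[reported] = counts.get(reported, 0) + 1
def solutionAltCountStep (c : PySem.Dict String Int) (p : List String) : PySem.Dict String Int :=
  match p with
  | [_, reported] => c.insert reported (c.getD reported 0 + 1)
  | _ => c  -- Python raises ValueError unpacking here; excluded by Pre_solution

-- if counts.get(reported, 0) >= k: answer[reporter] += 1
def solutionAltAnswerStep (counts : PySem.Dict String Int) (k : Int)
    (a : PySem.Dict String Int) (p : List String) : PySem.Dict String Int :=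
  match p with
  | [reporter, reported] =>
      if counts.getD reported 0 ≥ k then a.insert reporter (a.getD reporter 0 + 1) else a
  | _ => a

def solution_alt (id_list : List String) (report : List String) (k : Int) : List Int :=
  -- pairs = {tuple(r.split()) for r in report}   (split results kept as lists; a Set of them)
  let pairs : PySem.Set (List String) := PySem.Set.ofList (report.map PySem.Str.split₀)
  -- counts = {}; for _, reported in pairs: …   (a Dict only looked up afterwards)
  let counts : PySem.Dict String Int := pairs.foldl solutionAltCountStep PySem.Dict.empty
  -- answer = {u: 0 for u in id_list}
  let answer : PySem.Dict String Int := id_list.foldl (fun a u => a.insert u 0) PySem.Dict.empty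
  -- for reporter, reported in pairs: …
  let answer := pairs.foldl (solutionAltAnswerStep counts k) answer
  -- [answer[u] for u in id_list]
  id_list.map (fun u => answer.getD u 0)

-- ===== PRECONDITION & SPEC =====
-- Pre_ excludes (a) reports that do not split into exactly two tokens or whose tokens name users
-- outside id_list — there A raises ValueError/KeyError (when the reported user's distinct-reporter
-- count reaches k, an unknown reporter makes B raise the same KeyError; below k both agree, so Pre_
-- is slightly narrower than the crash set) — and (b) id_lists with duplicate entries combined with a
-- nonempty report, where A's double-visiting of the duplicated user is an accident of its per-user loop.
def Pre_solution (id_list : List String) (report : List String) (k : Int) : Prop :=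
  (report = [] ∨ id_list.Nodup) ∧
    ∀ r ∈ report, (PySem.Str.split₀ r).length = 2 ∧ ∀ t ∈ PySem.Str.split₀ r, t ∈ id_list
instance (id_list : List String) (report : List String) (k : Int) : Decidable (Pre_solution id_list report k) := by unfold Pre_solution; infer_instance
def pvWitness_solution : List String × List String × Int := (["muzi", "frodo", "apeach"], ["muzi frodo", "apeach frodo", "muzi frodo"], 2)

def Spec_solution (id_list : List String) (report : List String) (k : Int) (out : List Int) : Prop := out = solution_alt id_list report k
instance (id_list : List String) (report : List String) (k : Int) (out : List Int) : Decidable (Spec_solution id_list report k out) := by unfold Spec_solution; infer_instance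

-- ===== CLAIM (what is proved, stated in full; the proofs are below) =====
def Claim_equal_solution : Prop := ∀ (id_list : List String) (report : List String) (k : Int), Dom_solution id_list report k → Pre_solution id_list report k → Spec_solution id_list report k (solution id_list report k)

-- ===== LEMMAS AND PROOFS =====

-- A's report loop shadowed on the key list of the inner dict of one reported user v
def pvRepStep (v : String) (acc : List String) (p : List String) : List String :=
  match p with
  | [a, b] => if b = v then (if a ∈ acc then acc else acc ++ [a]) else acc
  | _ => acc

-- extract the reporter from a split report whose reported user is v
def pvExtAt (v : String) (p : List String) : Option String :=
  match p with
  | [a, b] => if b = v then some a else none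
  | _ => none

-- "the reported user of p is v"
def pvSndIs (v : String) (p : List String) : Bool :=
  match p with
  | [_, b] => decide (b = v)
  | _ => false

-- B's answer-loop increment condition, on the counts dict / on the deduped pair list
def pvQB (counts : PySem.Dict String Int) (k : Int) (u : String) (p : List String) : Bool :=
  match p with
  | [x, y] => decide (x = u) && decide (counts.getD y 0 ≥ k)
  | _ => false

def pvQ (P : List (List String)) (k : Int) (u : String) (p : List String) : Bool :=
  match p with
  | [x, y] => decide (x = u) && decide ((P.countP (pvSndIs y) : Int) ≥ k)
  | _ => false

theorem pvStepA_keys (d : PySem.Dict String (PySem.Dict String Int)) (r : String)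
    (v : String) :
    ((solutionReportStep d r).getD v PySem.Dict.empty).keys
      = pvRepStep v ((d.getD v PySem.Dict.empty).keys) (PySem.Str.split₀ r) := by
  unfold solutionReportStep
  rcases hs : PySem.Str.split₀ r with _ | ⟨a, _ | ⟨b, _ | ⟨c, t⟩⟩⟩ <;>
    simp only [pvRepStep]
  rw [PySem.Dict.getD_insert]
  by_cases hv : v = b
  · subst hv
    rw [if_pos rfl, if_pos rfl]
    by_cases hc : (d.getD v PySem.Dict.empty).contains a = true
    · rw [PySem.Dict.keys_insert_of_contains _ _ hc,
        if_pos ((PySem.Dict.contains_iff_mem_keys _ _).mp hc)]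
    · rw [PySem.Dict.keys_insert_of_not_contains _ _ (by simpa using hc),
        if_neg (fun hm => hc ((PySem.Dict.contains_iff_mem_keys _ _).mpr hm))]
  · rw [if_neg hv, if_neg (fun h => hv h.symm)]

theorem pvFoldA_keys (report : List String) :
    ∀ (d : PySem.Dict String (PySem.Dict String Int)) (v : String),
    ((report.foldl solutionReportStep d).getD v PySem.Dict.empty).keys
      = (report.map PySem.Str.split₀).foldl (pvRepStep v) ((d.getD v PySem.Dict.empty).keys) := by
  induction report with
  | nil => intro d v; rfl
  | cons r report ih =>
    intro d v
    simp only [List.foldl_cons, List.map_cons]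
    rw [ih, pvStepA_keys]

theorem pvInitA_empty (ids : List String) (d : PySem.Dict String (PySem.Dict String Int))
    (h : ∀ x, d.getD x PySem.Dict.empty = PySem.Dict.empty) :
    ∀ x, (ids.foldl (fun d u => d.insert u PySem.Dict.empty) d).getD x PySem.Dict.empty
      = PySem.Dict.empty := by
  induction ids generalizing d with
  | nil => exact h
  | cons u ids ih =>
    refine ih _ (fun x => ?_)
    rw [PySem.Dict.getD_insert]
    split_ifs with hx
    · rfl
    · exact h x

theorem pvInit0 (ids : List String) (a : PySem.Dict String Int)
    (h : ∀ x, a.getD x 0 = 0) :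
    ∀ x, (ids.foldl (fun a u => a.insert u 0) a).getD x 0 = 0 := by
  induction ids generalizing a with
  | nil => exact h
  | cons u ids ih =>
    refine ih _ (fun x => ?_)
    rw [PySem.Dict.getD_insert]
    split_ifs with hx
    · rfl
    · exact h x

theorem pvItemsIncr (l : List (String × Int)) (ad : PySem.Dict String Int) (u : String) :
    (l.foldl (fun ad p => ad.insert p.1 (ad.getD p.1 0 + 1)) ad).getD u 0
      = ad.getD u 0 + ((l.map Prod.fst).count u : Int) := by
  rw [show l.foldl (fun ad p => ad.insert p.1 (ad.getD p.1 0 + 1)) ad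
      = (l.map Prod.fst).foldl (fun d x => d.insert x (d.getD x 0 + 1)) ad from by
      rw [List.foldl_map]]
  exact PySem.Dict.getD_foldl_insert_add_one _ _ _

theorem pvThirdLoop (ids : List String) (wrm : PySem.Dict String (PySem.Dict String Int))
    (k : Int) (u : String) :
    ∀ ad : PySem.Dict String Int,
    (ids.foldl (fun ad user =>
        let inner := wrm.getD user PySem.Dict.empty
        if ((inner.size : Int)) ≥ k then
          inner.items.foldl (fun ad p => ad.insert p.1 (ad.getD p.1 0 + 1)) ad
        else ad) ad).getD u 0
      = ad.getD u 0 + (ids.map (fun v =>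
          if (((wrm.getD v PySem.Dict.empty).size : Int)) ≥ k then
            (((wrm.getD v PySem.Dict.empty).keys.count u : Int)) else 0)).sum := by
  induction ids with
  | nil => simp
  | cons v ids ih =>
    intro ad
    simp only [List.foldl_cons, List.map_cons, List.sum_cons]
    by_cases h : ((wrm.getD v PySem.Dict.empty).size : Int) ≥ k
    · rw [if_pos h, if_pos h, ih, pvItemsIncr]
      have hk : ((wrm.getD v PySem.Dict.empty).items.map Prod.fst)
          = (wrm.getD v PySem.Dict.empty).keys := rfl
      rw [hk]; ring
    · rw [if_neg h, if_neg h, ih]; ring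

theorem pvCountsFold (P : List (List String)) :
    ∀ (c : PySem.Dict String Int) (x : String),
    (P.foldl solutionAltCountStep c).getD x 0
      = c.getD x 0 + (P.countP (pvSndIs x) : Int) := by
  induction P with
  | nil => intro c x; simp
  | cons p P ih =>
    intro c x
    rcases p with _ | ⟨a, _ | ⟨b, _ | ⟨c', t⟩⟩⟩
    · simp only [List.foldl_cons, List.countP_cons]; rw [ih]; simp [pvSndIs, solutionAltCountStep]
    · simp only [List.foldl_cons, List.countP_cons]; rw [ih]; simp [pvSndIs, solutionAltCountStep]
    · simp only [List.foldl_cons, List.countP_cons, ih, solutionAltCountStep]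
      rw [PySem.Dict.getD_insert]
      by_cases hx : x = b
      · subst hx
        simp only [pvSndIs, decide_true]
        push_cast; ring
      · rw [if_neg hx]
        simp only [pvSndIs]
        rw [if_neg (by simpa using fun h : b = x => hx h.symm)]
        push_cast; ring
    · simp only [List.foldl_cons, List.countP_cons]; rw [ih]; simp [pvSndIs, solutionAltCountStep]

theorem pvAnswerFold (counts : PySem.Dict String Int) (k : Int) (u : String)
    (P : List (List String)) :
    ∀ a : PySem.Dict String Int,
    (P.foldl (solutionAltAnswerStep counts k) a).getD u 0
      = a.getD u 0 + (P.countP (pvQB counts k u) : Int) := by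
  induction P with
  | nil => intro a; simp
  | cons p P ih =>
    intro a
    rcases p with _ | ⟨x, _ | ⟨y, _ | ⟨c', t⟩⟩⟩
    · simp only [List.foldl_cons, List.countP_cons]; rw [ih]; simp [pvQB, solutionAltAnswerStep]
    · simp only [List.foldl_cons, List.countP_cons]; rw [ih]; simp [pvQB, solutionAltAnswerStep]
    · simp only [List.foldl_cons, List.countP_cons, ih, solutionAltAnswerStep, pvQB]
      by_cases hc : counts.getD y 0 ≥ k
      · rw [if_pos hc, PySem.Dict.getD_insert]
        by_cases hx : u = x
        · subst hx
          simp only [decide_true, Bool.true_and, hc, if_pos]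
          push_cast; ring
        · rw [if_neg hx]
          rw [if_neg (by simp [hc]; exact fun h => hx h.symm)]
          push_cast; ring
      · rw [if_neg hc]
        rw [if_neg (by simp [hc])]
        push_cast; ring
    · simp only [List.foldl_cons, List.countP_cons]; rw [ih]; simp [pvQB, solutionAltAnswerStep]

theorem pvExtAt_eq_some (v : String) (p : List String) (a : String) :
    pvExtAt v p = some a ↔ p = [a, v] := by
  rcases p with _ | ⟨x, _ | ⟨y, _ | ⟨c', t⟩⟩⟩
  · simp [pvExtAt]
  · simp [pvExtAt]
  · by_cases hy : y = v
    · subst hy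
      simp [pvExtAt]
    · simp [pvExtAt, hy]
  · simp [pvExtAt]

theorem pvRepsFilterMap (v : String) (L : List (List String)) :
    ∀ s : List (List String),
    L.foldl (pvRepStep v) (s.filterMap (pvExtAt v))
      = (L.foldl PySem.Set.add s).filterMap (pvExtAt v) := by
  induction L with
  | nil => intro s; rfl
  | cons p L ih =>
    intro s
    simp only [List.foldl_cons]
    have hstep : pvRepStep v (s.filterMap (pvExtAt v)) p
        = (PySem.Set.add s p).filterMap (pvExtAt v) := by
      rcases p with _ | ⟨a, _ | ⟨b, _ | ⟨c', t⟩⟩⟩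
      · simp only [pvRepStep, PySem.Set.add]
        split_ifs
        · rfl
        · rw [List.filterMap_append]; simp [pvExtAt]
      · simp only [pvRepStep, PySem.Set.add]
        split_ifs
        · rfl
        · rw [List.filterMap_append]; simp [pvExtAt]
      · by_cases hb : b = v
        · subst hb
          have hmem : a ∈ s.filterMap (pvExtAt b) ↔ [a, b] ∈ s := by
            simp only [List.mem_filterMap]
            constructor
            · rintro ⟨q, hq, hq2⟩
              rwa [(pvExtAt_eq_some b q a).mp hq2] at hq
            · intro hm
              exact ⟨[a, b], hm, by simp [pvExtAt]⟩
          by_cases hm : [a, b] ∈ s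
          · have h1 : a ∈ s.filterMap (pvExtAt b) := hmem.mpr hm
            have h2 : PySem.Set.contains s [a, b] = true :=
              (PySem.Set.contains_iff _ _).mpr hm
            simp only [pvRepStep, PySem.Set.add]
            rw [if_pos trivial, if_pos h1, if_pos h2]
          · have h1 : a ∉ s.filterMap (pvExtAt b) := fun h => hm (hmem.mp h)
            have h2 : ¬ PySem.Set.contains s [a, b] = true :=
              fun h => hm ((PySem.Set.contains_iff _ _).mp h)
            simp only [pvRepStep, PySem.Set.add]
            rw [if_pos trivial, if_neg h1, if_neg h2, List.filterMap_append]
            simp [pvExtAt]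
        · simp only [pvRepStep, PySem.Set.add, if_neg hb]
          split_ifs
          · rfl
          · rw [List.filterMap_append]; simp [pvExtAt, hb]
      · simp only [pvRepStep, PySem.Set.add]
        split_ifs
        · rfl
        · rw [List.filterMap_append]; simp [pvExtAt]
    rw [hstep]
    exact ih (PySem.Set.add s p)

theorem pvReps_eq (L : List (List String)) (v : String) :
    L.foldl (pvRepStep v) [] = (PySem.Set.ofList L).filterMap (pvExtAt v) := by
  have h := pvRepsFilterMap v L []
  simpa [PySem.Set.ofList_eq_foldl] using h

theorem pvExtAt_isSome (v : String) (p : List String) :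
    (pvExtAt v p).isSome = pvSndIs v p := by
  rcases p with _ | ⟨x, _ | ⟨y, _ | ⟨c', t⟩⟩⟩
  · rfl
  · rfl
  · by_cases hy : y = v <;> simp [pvExtAt, pvSndIs, hy]
  · rfl

theorem pvSumSingle (ids : List String) (b : String) (h1 : ids.Nodup) (h2 : b ∈ ids) :
    (ids.map (fun v => if b = v then (1 : Int) else 0)).sum = 1 := by
  induction ids with
  | nil => cases h2
  | cons v ids ih =>
    rcases List.nodup_cons.mp h1 with ⟨hv, hnd⟩
    rcases List.mem_cons.mp h2 with hbv | hb
    · subst hbv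
      have hz : (ids.map (fun v => if b = v then (1 : Int) else 0)).sum = 0 := by
        rw [List.sum_eq_zero]
        intro x hx
        rcases List.mem_map.mp hx with ⟨w, hw, rfl⟩
        rw [if_neg (fun h => hv (by rw [h]; exact hw))]
      simp [hz]
    · have hne : b ≠ v := fun h => hv (h ▸ hb)
      simp [hne, ih hnd hb]

theorem pvPartition (P : List (List String)) (ids : List String) (h1 : ids.Nodup)
    (h2 : ∀ p ∈ P, ∃ a b, p = [a, b] ∧ b ∈ ids) (Q : List String → Bool) :
    (P.countP Q : Int)
      = (ids.map (fun v => (P.countP (fun p => Q p && pvSndIs v p) : Int))).sum := by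
  induction P with
  | nil => simp
  | cons p P ih =>
    obtain ⟨a, b, rfl, hb⟩ := h2 p List.mem_cons_self
    have ihP := ih (fun q hq => h2 q (List.mem_cons_of_mem _ hq))
    simp only [List.countP_cons]
    have hsplit : ∀ (n : Nat) (c : Bool),
        ((n + if c = true then 1 else 0 : Nat) : Int)
          = (n : Int) + (if c = true then (1 : Int) else 0) := by
      intro n c; cases c <;> simp
    simp only [hsplit]
    rw [ihP, PySem.List.sum_map_add_int]
    congr 1
    by_cases hq : Q [a, b] = true
    · rw [if_pos hq]
      have hmc : ids.map (fun v => if (Q [a, b] && pvSndIs v [a, b]) = true then (1 : Int) else 0)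
          = ids.map (fun v => if b = v then (1 : Int) else 0) := by
        refine List.map_congr_left (fun v hv => ?_)
        simp [pvSndIs, hq]
      rw [hmc, pvSumSingle ids b h1 hb]
    · rw [if_neg hq]
      rw [List.sum_eq_zero]
      intro x hx
      rcases List.mem_map.mp hx with ⟨w, hw, rfl⟩
      simp [hq]

-- characterization of port A ---------------------------------------------------

theorem pvSolutionA_val (ids report : List String) (k : Int) :
    solution ids report k = ids.map (fun u =>
      (ids.map (fun v =>
        if ((((report.map PySem.Str.split₀).foldl (pvRepStep v) []).length : Int) ≥ k) then
          (((report.map PySem.Str.split₀).foldl (pvRepStep v) []).count u : Int)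
        else 0)).sum) := by
  unfold solution
  rw [PySem.List.foldl_prod_mk
    (f := fun (d : PySem.Dict String (PySem.Dict String Int)) user => d.insert user PySem.Dict.empty)
    (g := fun (a : PySem.Dict String Int) user => a.insert user 0)]
  simp only
  set wrm := report.foldl solutionReportStep
      (ids.foldl (fun d u => d.insert u PySem.Dict.empty) PySem.Dict.empty) with hwrm
  set ad0 := ids.foldl (fun a u => a.insert u 0)
      (PySem.Dict.empty : PySem.Dict String Int) with had0
  set adF := ids.foldl (fun ad user =>
      let inner := wrm.getD user PySem.Dict.empty
      if ((inner.size : Int)) ≥ k then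
        inner.items.foldl (fun ad p => ad.insert p.1 (ad.getD p.1 0 + 1)) ad
      else ad) ad0 with hadF
  rw [PySem.List.foldl_append_singleton_eq_map, List.nil_append]
  rw [show (fun i => adF.getD (PySem.List.pyGetD ids i "") 0)
      = (fun u => adF.getD u 0) ∘ (fun i => PySem.List.pyGetD ids i "") from rfl,
    ← List.map_map, PySem.List.map_pyGetD_pyRange_zero']
  refine List.map_congr_left (fun u hu => ?_)
  rw [hadF, pvThirdLoop]
  rw [had0, pvInit0 ids PySem.Dict.empty (fun x => by simp) u, zero_add]
  refine congrArg List.sum (List.map_congr_left (fun v hv => ?_))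
  have hkeys : (wrm.getD v PySem.Dict.empty).keys
      = (report.map PySem.Str.split₀).foldl (pvRepStep v) [] := by
    rw [hwrm, pvFoldA_keys,
      pvInitA_empty ids PySem.Dict.empty (fun x => by simp) v]
    rfl
  have hsize : ((wrm.getD v PySem.Dict.empty).size : Int)
      = (((wrm.getD v PySem.Dict.empty).keys.length : Nat) : Int) := by
    have h : (wrm.getD v PySem.Dict.empty).keys.length
        = (wrm.getD v PySem.Dict.empty).size := by
      simp only [PySem.Dict.keys, PySem.Dict.size, List.length_map]
    exact_mod_cast h.symm
  rw [hsize, hkeys]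

-- characterization of port B ---------------------------------------------------

theorem pvSolutionB_val (ids report : List String) (k : Int) :
    solution_alt ids report k = ids.map (fun u =>
      ((PySem.Set.ofList (report.map PySem.Str.split₀)).countP
        (pvQ (PySem.Set.ofList (report.map PySem.Str.split₀)) k u) : Int)) := by
  unfold solution_alt
  set P := PySem.Set.ofList (report.map PySem.Str.split₀) with hPdef
  refine List.map_congr_left (fun u hu => ?_)
  rw [pvAnswerFold]
  rw [pvInit0 ids PySem.Dict.empty (fun x => by simp) u, zero_add]
  congr 1
  refine List.countP_congr (fun p hp => ?_)
  rcases p with _ | ⟨x, _ | ⟨y, _ | ⟨c', t⟩⟩⟩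
  · exact Iff.rfl
  · exact Iff.rfl
  · simp only [pvQB, pvQ]
    rw [pvCountsFold]
    simp
  · exact Iff.rfl

-- ===== VERDICT (by name: the statement is the Claim_ definition above) =====
theorem solution_spec : Claim_equal_solution := by
  unfold Claim_equal_solution
  intro ids report k _hdom hpre
  obtain ⟨hnd0, hrep⟩ := hpre
  rcases hnd0 with hrep0 | hnd
  · subst hrep0
    unfold Spec_solution
    rw [pvSolutionA_val, pvSolutionB_val]
    refine List.map_congr_left (fun u hu => ?_)
    simp [PySem.Set.ofList, List.sum_eq_zero]
  unfold Spec_solution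
  rw [pvSolutionA_val, pvSolutionB_val]
  refine List.map_congr_left (fun u hu => ?_)
  set L := report.map PySem.Str.split₀ with hL
  set P := PySem.Set.ofList L with hP
  have hshape : ∀ p ∈ P, ∃ a b, p = [a, b] ∧ b ∈ ids := by
    intro p hp
    have hpL : p ∈ L := (PySem.Set.mem_ofList L p).mp hp
    rcases List.mem_map.mp hpL with ⟨r, hr, rfl⟩
    rcases hrep r hr with ⟨hlen, htok⟩
    rcases List.length_eq_two.mp hlen with ⟨a, b, hab⟩
    exact ⟨a, b, hab, htok b (by rw [hab]; simp)⟩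
  rw [pvPartition P ids hnd hshape (pvQ P k u)]
  refine congrArg List.sum (List.map_congr_left (fun v hv => ?_))
  -- per reported user v
  have hlen : ∀ w : String, (L.foldl (pvRepStep w) []).length = P.countP (pvSndIs w) := by
    intro w
    rw [pvReps_eq]
    rw [List.length_filterMap_eq_countP]
    refine List.countP_congr (fun p hp => ?_)
    rw [pvExtAt_isSome w p]
  have hcnt : (L.foldl (pvRepStep v) []).count u
      = P.countP (fun p => decide (p = [u, v])) := by
    rw [pvReps_eq, List.count_filterMap]
    refine List.countP_congr (fun p hp => ?_)
    by_cases h : p = [u, v]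
    · subst h
      simp [pvExtAt]
    · have hne : pvExtAt v p ≠ some u := fun hc => h ((pvExtAt_eq_some v p u).mp hc)
      simp [h, hne]
  have hpt : ∀ p, (pvQ P k u p && pvSndIs v p)
      = (decide (p = [u, v]) && decide ((P.countP (pvSndIs v) : Int) ≥ k)) := by
    intro p
    rcases p with _ | ⟨x, _ | ⟨y, _ | ⟨c', t⟩⟩⟩
    · simp [pvQ, pvSndIs]
    · simp [pvQ, pvSndIs]
    · by_cases hy : y = v
      · subst hy
        by_cases hx : x = u
        · subst hx
          simp [pvQ, pvSndIs]
        · simp [pvQ, pvSndIs, hx]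
      · simp [pvQ, pvSndIs, hy]
    · simp [pvQ, pvSndIs]
  rw [show List.countP (fun p => pvQ P k u p && pvSndIs v p) P
      = List.countP (fun p => decide (p = [u, v])
          && decide ((P.countP (pvSndIs v) : Int) ≥ k)) P from
    List.countP_congr (fun p _ => by rw [hpt p])]
  by_cases hcond : ((P.countP (pvSndIs v) : Int) ≥ k)
  · rw [if_pos (by rw [hlen v]; exact hcond)]
    have : (fun p => decide (p = [u, v]) && decide ((P.countP (pvSndIs v) : Int) ≥ k))
        = (fun p => decide (p = [u, v])) := by
      funext p; simp [hcond]
    rw [this, hcnt]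
  · rw [if_neg (by rw [hlen v]; exact hcond)]
    have : (fun p => decide (p = [u, v]) && decide ((P.countP (pvSndIs v) : Int) ≥ k))
        = (fun _ => false) := by
      funext p; simp [hcond]
    rw [this]
    simp
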